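-- pv_equiv track=rewrite | github.com/GrantMatejka/AdventOfCode | 2023/14/sol.py | roll_east
-- ===== SOURCE A (Python) =====
-- def roll_east(lines):
-- 	for x in range(len(lines)):
-- 		for y in range(len(lines[0])-1,-1,-1):
-- 			if lines[x][y] == "O":
-- 				roll_idx = y + 1
-- 				row = lines[x]
-- 				rolled = False
-- 				while roll_idx < len(row) and row[roll_idx] == ".":
-- 					rolled = True
-- 					roll_idx += 1
-- 				if rolled:
-- 					# make up for one too many iterations
-- 					roll_idx -= 1
-- 					lines[x] = lines[x][:y] + "." + lines[x][y+1:]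
-- 					lines[x] = lines[x][:roll_idx] + "O" + lines[x][roll_idx+1:]
-- 	return lines
-- ===== SOURCE B (Python) =====
-- def roll_east(lines):
--     # One left-to-right pass per row: within each run of cells between
--     # blockers, dots are emitted first and rocks last (rocks settle east).
--     # Mutates `lines` in place and returns it.
--     for i, row in enumerate(lines):
--         parts = []
--         dots = rocks = 0
--         for c in row:
--             if c == '.':
--                 dots += 1
--             elif c == 'O':
--                 rocks += 1
--             else:
--                 parts.append('.' * dots + 'O' * rocks + c)
--                 dots = rocks = 0
--         parts.append('.' * dots + 'O' * rocks)
--         lines[i] = ''.join(parts)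
--     return lines
-- ===== Notes on version B (the rewrite author's own statement) =====
-- stated objective: alternative
-- what changed: Replaces A's per-rock right-to-left scan-and-swap (re-scanning the dot run for every rock) by a single left-to-right pass per row that counts dots and rocks within each blocker-delimited run and emits the dots before the rocks.
-- intended difference: On inputs where some row is longer than the first row and carries a rock 'O' at a column >= len(lines[0]) immediately followed by '.', A leaves that rock in place (its column loop only ranges over the first row's width) while B rolls every rock east, which is the intended behaviour of the function. — e.g. on roll_east(["..", "..O."]): A returns ["..", "..O."], B returns ["..", "...O"]
import Mathlib
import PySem

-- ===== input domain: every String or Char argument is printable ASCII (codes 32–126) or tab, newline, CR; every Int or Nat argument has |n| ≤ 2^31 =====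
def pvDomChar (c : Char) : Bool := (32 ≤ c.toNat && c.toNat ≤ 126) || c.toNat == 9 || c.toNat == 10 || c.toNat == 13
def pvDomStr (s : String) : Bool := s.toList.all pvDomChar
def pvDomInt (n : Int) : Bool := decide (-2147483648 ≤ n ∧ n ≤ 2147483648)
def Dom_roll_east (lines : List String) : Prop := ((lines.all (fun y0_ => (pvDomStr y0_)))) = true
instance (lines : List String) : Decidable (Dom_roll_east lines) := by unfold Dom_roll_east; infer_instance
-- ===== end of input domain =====

-- B replaces A's right-to-left per-rock scan-and-swap by one left-to-right
-- counting pass per row (objective: alternative).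
-- Both Pythons mutate `lines` in place; the theorems are about the returned value.

-- ===== PORT A =====
-- `while roll_idx < len(row) and row[roll_idx] == '.'` (roll_idx starts at
-- y+1 ≥ 1 and only grows, so it is a Nat here); returns (roll_idx, rolled).
def scanA (row : List Char) (i : Nat) (rolled : Bool) : Nat × Bool :=
  if h : i < row.length then
    if row[i] = '.' then scanA row (i + 1) true else (i, rolled)
  else (i, rolled)
termination_by row.length - i

-- `row[:i] + [c] + row[i+1:]` — Python slices with nonnegative bounds are take/drop
def setCharA (row : List Char) (i : Nat) (c : Char) : List Char :=
  row.take i ++ [c] ++ row.drop (i + 1)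

-- the body of the y-loop for one index y
def stepA (row : List Char) (y : Nat) : List Char :=
  match row[y]? with
  | none => row                       -- unreachable under Pre_ (y < len row)
  | some c =>
    if c = 'O' then
      let s := scanA row (y + 1) false
      if s.2 then
        setCharA (setCharA row y '.') (s.1 - 1) 'O'
      else row
    else row

-- `for y in range(len(lines[0])-1, -1, -1)`: process y = k-1, k-2, …, 0
def procA (row : List Char) (k : Nat) : List Char :=
  match k with
  | 0 => row
  | k + 1 => procA (stepA row k) k

-- outer loop: each iteration only rewrites lines[x] (rows are independent);
-- len(lines[0]) is constant across iterations since stepA preserves length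
def roll_east (lines : List String) : List String :=
  lines.map (fun s => String.ofList (procA s.toList (lines.headD "").toList.length))

-- ===== PORT B =====
-- Source B's per-character loop: `parts` accumulator plus dot/rock counters
def rowB (row : List Char) (parts : List Char) (dots rocks : Nat) : List Char :=
  match row with
  | [] => parts ++ List.replicate dots '.' ++ List.replicate rocks 'O'
  | c :: rest =>
    if c = '.' then rowB rest parts (dots + 1) rocks
    else if c = 'O' then rowB rest parts dots (rocks + 1)
    else rowB rest (parts ++ List.replicate dots '.' ++ List.replicate rocks 'O' ++ [c]) 0 0

def roll_east_alt (lines : List String) : List String :=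
  lines.map (fun s => String.ofList (rowB s.toList [] 0 0))

-- ===== PRECONDITION & SPEC =====
-- Pre_ is exactly A's return domain: on a row shorter than the first row A
-- raises IndexError (every row is indexed by len(lines[0])).
def Pre_roll_east (lines : List String) : Prop :=
  ∀ s ∈ lines, (lines.headD "").toList.length ≤ s.toList.length
instance (lines : List String) : Decidable (Pre_roll_east lines) := by
  unfold Pre_roll_east; infer_instance

def pvWitness_roll_east : List String := ["O.#O", ".O.."]

-- On inputs where some row is longer than the first row and carries a rock 'O'
-- at a column ≥ len(lines[0]) immediately followed by '.', A leaves that rock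
-- in place (its column loop only ranges over the first row's width) while B
-- rolls every rock east, which is the intended behaviour.
def D_roll_east (lines : List String) : Prop :=
  ∃ s ∈ lines, ∃ i ∈ List.range s.toList.length,
    (lines.headD "").toList.length ≤ i ∧
    s.toList[i]? = some 'O' ∧ s.toList[i + 1]? = some '.'
instance (lines : List String) : Decidable (D_roll_east lines) := by
  unfold D_roll_east; infer_instance

def Spec_roll_east (lines : List String) (out : List String) : Prop :=
  ¬ D_roll_east lines → out = roll_east_alt lines
instance (lines : List String) (out : List String) : Decidable (Spec_roll_east lines out) := by unfold Spec_roll_east; infer_instance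

def pvDiffWitness_roll_east : List String := ["..", "..O."]
def pvDiffWitnessOut_roll_east : (List String) × (List String) :=
  (["..", "..O."], ["..", "...O"])

-- ===== CLAIM (what is proved, stated in full; the proofs are below) =====
def Claim_unchanged_roll_east : Prop := ∀ (lines : List String), Dom_roll_east lines → Pre_roll_east lines → Spec_roll_east lines (roll_east lines)
def Claim_changed_roll_east : Prop := Dom_roll_east (pvDiffWitness_roll_east) ∧ Pre_roll_east (pvDiffWitness_roll_east) ∧ D_roll_east (pvDiffWitness_roll_east) ∧ roll_east (pvDiffWitness_roll_east) = pvDiffWitnessOut_roll_east.1 ∧ roll_east_alt (pvDiffWitness_roll_east) = pvDiffWitnessOut_roll_east.2 ∧ pvDiffWitnessOut_roll_east.1 ≠ pvDiffWitnessOut_roll_east.2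
def Claim_exact_roll_east : Prop := ∀ (lines : List String), Dom_roll_east lines → Pre_roll_east lines → D_roll_east lines → roll_east lines ≠ roll_east_alt lines

-- ===== LEMMAS AND PROOFS =====

-- recursive reformulation of B's per-row loop (no accumulator)
def fixB : List Char → Nat → Nat → List Char
  | [], dots, rocks => List.replicate dots '.' ++ List.replicate rocks 'O'
  | c :: rest, dots, rocks =>
    if c = '.' then fixB rest (dots + 1) rocks
    else if c = 'O' then fixB rest dots (rocks + 1)
    else List.replicate dots '.' ++ List.replicate rocks 'O' ++ c :: fixB rest 0 0

lemma rowB_eq (row : List Char) : ∀ (parts : List Char) (a b : Nat),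
    rowB row parts a b = parts ++ fixB row a b := by
  induction row with
  | nil => intro parts a b; simp [rowB, fixB]
  | cons c rest ih =>
    intro parts a b
    simp only [rowB, fixB]
    by_cases h1 : c = '.'
    · simp [h1, ih]
    · by_cases h2 : c = 'O'
      · simp [h2, ih]
      · simp [h1, h2, ih]

lemma fixB_cons_dot (l : List Char) (a b : Nat) :
    fixB ('.' :: l) a b = fixB l (a + 1) b := by simp [fixB]

lemma fixB_cons_O (l : List Char) (a b : Nat) :
    fixB ('O' :: l) a b = fixB l a (b + 1) := by simp [fixB]

lemma fixB_cons_blocked (c : Char) (l : List Char) (a b : Nat)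
    (h1 : ¬(c = '.')) (h2 : ¬(c = 'O')) :
    fixB (c :: l) a b
      = List.replicate a '.' ++ List.replicate b 'O' ++ c :: fixB l 0 0 := by
  simp [fixB, h1, h2]

-- `settled l` : no 'O' immediately followed by '.'
def settled : List Char → Bool
  | [] => true
  | [_] => true
  | a :: b :: t => !(a = 'O' && b = '.') && settled (b :: t)

lemma settled_tail (c : Char) (l : List Char)
    (h : settled (c :: l) = true) : settled l = true := by
  cases l with
  | nil => rfl
  | cons d t =>
    have : (!(c = 'O' && d = '.') && settled (d :: t)) = true := h
    exact (Bool.and_eq_true _ _ |>.mp this).2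

lemma settled_head (l : List Char)
    (h : settled ('O' :: l) = true) : l.headD '#' ≠ '.' := by
  cases l with
  | nil => simp
  | cons d t =>
    have habt : (!('O' = 'O' && d = '.') && settled (d :: t)) = true := h
    have h1 := (Bool.and_eq_true _ _ |>.mp habt).1
    simp only [List.headD_cons]
    intro hd
    subst hd
    simp at h1

lemma settled_cons (c : Char) (l : List Char)
    (h : settled l = true)
    (hc : c ≠ 'O' ∨ l.headD '#' ≠ '.') :
    settled (c :: l) = true := by
  cases l with
  | nil => rfl
  | cons d t =>
    show (!(c = 'O' && d = '.') && settled (d :: t)) = true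
    simp only [Bool.and_eq_true, Bool.not_eq_true']
    refine ⟨?_, h⟩
    rcases hc with hc | hc
    · simp [hc]
    · simp only [List.headD_cons] at hc
      simp [hc]

lemma settled_drop (j : Nat) : ∀ (l : List Char),
    settled l = true → settled (l.drop j) = true := by
  induction j with
  | zero => intro l h; simpa using h
  | succ j ih =>
    intro l h
    cases l with
    | nil => simp [settled]
    | cons c t =>
      rw [List.drop_succ_cons]
      exact ih t (settled_tail c t h)

-- fixB consumes leading dots into the counter
lemma fixB_dots (d : Nat) : ∀ (rest : List Char) (a b : Nat),
    fixB (List.replicate d '.' ++ rest) a b = fixB rest (a + d) b := by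
  induction d with
  | zero => intro rest a b; simp
  | succ d ih =>
    intro rest a b
    rw [List.replicate_succ, List.cons_append, fixB_cons_dot, ih]
    congr 1
    omega

-- fixB is the identity on settled rows
lemma fixB_settled (l : List Char) : ∀ (a b : Nat),
    settled l = true → (0 < b → l.headD '#' ≠ '.') →
    fixB l a b = List.replicate a '.' ++ List.replicate b 'O' ++ l := by
  induction l with
  | nil => intro a b _ _; simp [fixB]
  | cons c rest ih =>
    intro a b hs hb
    by_cases h1 : c = '.'
    · subst h1
      have hb0 : b = 0 := by
        by_contra h
        exact (hb (Nat.pos_of_ne_zero h)) (by simp)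
      subst hb0
      rw [fixB_cons_dot, ih (a + 1) 0 (settled_tail _ _ hs) (by simp)]
      simp [List.replicate_succ']
    · by_cases h2 : c = 'O'
      · subst h2
        rw [fixB_cons_O, ih a (b + 1) (settled_tail _ _ hs)
            (fun _ => settled_head rest hs)]
        simp [List.replicate_succ']
      · rw [fixB_cons_blocked c rest a b h1 h2,
          ih 0 0 (settled_tail _ _ hs) (by simp)]
        simp

lemma fixB_congr_prefix (s1 s2 : List Char) (pre : List Char) :
    ∀ (a b : Nat), (∀ a b, fixB s1 a b = fixB s2 a b) →
    fixB (pre ++ s1) a b = fixB (pre ++ s2) a b := by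
  induction pre with
  | nil => intro a b h; simpa using h a b
  | cons c rest ih =>
    intro a b h
    by_cases h1 : c = '.'
    · subst h1
      rw [List.cons_append, List.cons_append, fixB_cons_dot, fixB_cons_dot, ih _ _ h]
    · by_cases h2 : c = 'O'
      · subst h2
        rw [List.cons_append, List.cons_append, fixB_cons_O, fixB_cons_O, ih _ _ h]
      · rw [List.cons_append, List.cons_append, fixB_cons_blocked c _ a b h1 h2,
          fixB_cons_blocked c _ a b h1 h2, ih _ _ h]

-- moving a rock east across its dots does not change fixB
lemma fixB_move (d : Nat) (rest : List Char) (a b : Nat) :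
    fixB ('O' :: (List.replicate d '.' ++ rest)) a b
      = fixB (List.replicate d '.' ++ 'O' :: rest) a b := by
  rw [fixB_cons_O, fixB_dots, fixB_dots, fixB_cons_O]

-- number of leading dots
def lead : List Char → Nat
  | [] => 0
  | c :: rest => if c = '.' then lead rest + 1 else 0

lemma lead_decomp (l : List Char) :
    l = List.replicate (lead l) '.' ++ l.drop (lead l) := by
  induction l with
  | nil => simp [lead]
  | cons c rest ih =>
    by_cases h : c = '.'
    · subst h
      show '.' :: rest = List.replicate (lead ('.' :: rest)) '.' ++ _
      simp only [lead]
      exact congrArg _ ih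
    · simp [lead, h]

lemma lead_drop_head (l : List Char) : (l.drop (lead l)).headD '#' ≠ '.' := by
  induction l with
  | nil => simp [lead]
  | cons c rest ih =>
    by_cases h : c = '.'
    · subst h
      show ((('.' :: rest).drop (lead ('.' :: rest))).headD '#') ≠ '.'
      simp only [lead]
      exact ih
    · simp [lead, h]

-- characterising A's inner while-loop
lemma scanA_spec (d : Nat) : ∀ (pre rest : List Char) (rolled : Bool),
    rest.headD '#' ≠ '.' →
    scanA (pre ++ List.replicate d '.' ++ rest) pre.length rolled
      = (pre.length + d, rolled || decide (0 < d)) := by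
  induction d with
  | zero =>
    intro pre rest rolled hr
    simp only [List.replicate_zero, List.append_nil]
    rw [scanA]
    cases rest with
    | nil =>
      rw [dif_neg (by simp)]
      simp
    | cons r t =>
      have hlen : pre.length < (pre ++ r :: t).length := by simp
      rw [dif_pos hlen]
      have hget : (pre ++ r :: t)[pre.length]'hlen = r := by
        rw [List.getElem_append_right (le_refl _)]
        simp
      rw [hget, if_neg (by simpa using hr)]
      simp
  | succ d ih =>
    intro pre rest rolled hr
    rw [List.replicate_succ, List.append_assoc, List.cons_append]
    rw [scanA]
    have hlen : pre.length < (pre ++ '.' :: (List.replicate d '.' ++ rest)).length := by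
      simp
    rw [dif_pos hlen]
    have hget : (pre ++ '.' :: (List.replicate d '.' ++ rest))[pre.length]'hlen = '.' := by
      rw [List.getElem_append_right (le_refl _)]
      simp
    rw [hget, if_pos rfl]
    have hidx : pre.length + 1 = (pre ++ ['.']).length := by simp
    have hrw : pre ++ '.' :: (List.replicate d '.' ++ rest)
        = (pre ++ ['.']) ++ List.replicate d '.' ++ rest := by simp
    rw [hidx, hrw, ih (pre ++ ['.']) rest true hr]
    simp
    omega

lemma setCharA_spec (pre suf : List Char) (c c' : Char) :
    setCharA (pre ++ c :: suf) pre.length c' = pre ++ c' :: suf := by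
  unfold setCharA
  rw [List.take_append_of_le_length (le_refl _)]
  have h2 : (pre ++ c :: suf).drop (pre.length + 1) = suf := by
    have ha : pre ++ c :: suf = (pre ++ [c]) ++ suf := by simp
    have hb : pre.length + 1 = (pre ++ [c]).length := by simp
    rw [ha, hb, List.drop_left]
  simp [h2]

-- one step of A at position |pre|, with the suffix after the rock decomposed
lemma stepA_spec (pre suf : List Char) (c : Char) :
    stepA (pre ++ c :: suf) pre.length
      = if c = 'O'
        then pre ++ List.replicate (lead suf) '.' ++ 'O' :: suf.drop (lead suf)
        else pre ++ c :: suf := by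
  have hget : (pre ++ c :: suf)[pre.length]? = some c := by
    rw [List.getElem?_append_right (le_refl _)]
    simp
  unfold stepA
  rw [hget]
  dsimp only
  by_cases hc : c = 'O'
  · subst hc
    rw [if_pos rfl, if_pos rfl]
    have hscan : scanA (pre ++ 'O' :: suf) (pre.length + 1) false
        = (pre.length + 1 + lead suf, decide (0 < lead suf)) := by
      have hrw : pre ++ 'O' :: suf
          = (pre ++ ['O']) ++ List.replicate (lead suf) '.' ++ suf.drop (lead suf) := by
        conv_lhs => rw [lead_decomp suf]
        simp
      have hidx : pre.length + 1 = (pre ++ ['O']).length := by simp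
      rw [hrw, hidx, scanA_spec (lead suf) (pre ++ ['O']) _ false (lead_drop_head suf)]
      simp
    rw [hscan]
    by_cases hd : 0 < lead suf
    · simp only [hd, decide_true, if_true]
      have hri : pre.length + 1 + lead suf - 1 = pre.length + lead suf := by omega
      rw [hri]
      rw [setCharA_spec pre suf 'O' '.']
      obtain ⟨d, hd'⟩ : ∃ d, lead suf = d + 1 := ⟨lead suf - 1, by omega⟩
      have hrw2 : pre ++ '.' :: suf
          = (pre ++ '.' :: List.replicate d '.') ++ '.' :: suf.drop (d + 1) := by
        conv_lhs => rw [lead_decomp suf]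
        rw [hd']
        simp [List.replicate_succ']
      have hlen2 : pre.length + lead suf = (pre ++ '.' :: List.replicate d '.').length := by
        simp [hd']
      rw [hrw2, hlen2, setCharA_spec, hd']
      simp [List.replicate_succ]
    · have hl0 : lead suf = 0 := by omega
      have hdec := lead_decomp suf
      rw [hl0] at hdec ⊢
      simp only [hl0, decide_eq_true_eq] at *
      rw [if_neg (by simp)]
      simp only [List.replicate_zero]
      conv_lhs => rw [hdec]
      simp
  · rw [if_neg hc, if_neg hc]

-- a settled tail, with its dots-then-rock prefix, is settled
lemma settled_dots_O (d : Nat) (rest : List Char) :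
    rest.headD '#' ≠ '.' → settled rest = true →
    settled (List.replicate d '.' ++ 'O' :: rest) = true := by
  induction d with
  | zero =>
    intro hhd hrest
    simp only [List.replicate_zero, List.nil_append]
    exact settled_cons 'O' rest hrest (Or.inr hhd)
  | succ d ih =>
    intro hhd hrest
    rw [List.replicate_succ, List.cons_append]
    exact settled_cons '.' _ (ih hhd hrest) (Or.inl (by simp))

-- main invariant: once the suffix (starting at position |pre|) is settled,
-- finishing the descending loop normalises the whole row
lemma procA_fixB (pre : List Char) : ∀ (suf : List Char),
    settled suf = true →
    procA (pre ++ suf) pre.length = fixB (pre ++ suf) 0 0 := by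
  induction pre using List.reverseRecOn with
  | nil =>
    intro suf hs
    simp only [List.nil_append, List.length_nil, procA]
    rw [fixB_settled suf 0 0 hs (by simp)]
    simp
  | append_singleton pre c ih =>
    intro suf hs
    have hlen : (pre ++ [c]).length = pre.length + 1 := by simp
    rw [hlen]
    show procA (stepA ((pre ++ [c]) ++ suf) pre.length) pre.length = _
    have hrw : (pre ++ [c]) ++ suf = pre ++ c :: suf := by simp
    rw [hrw, stepA_spec pre suf c]
    by_cases hc : c = 'O'
    · subst hc
      rw [if_pos rfl]
      have hrest_settled : settled (suf.drop (lead suf)) = true :=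
        settled_drop (lead suf) suf hs
      have hsettled : settled
          (List.replicate (lead suf) '.' ++ 'O' :: suf.drop (lead suf)) = true :=
        settled_dots_O (lead suf) _ (lead_drop_head suf) hrest_settled
      have hrw2 : pre ++ List.replicate (lead suf) '.' ++ 'O' :: suf.drop (lead suf)
          = pre ++ (List.replicate (lead suf) '.' ++ 'O' :: suf.drop (lead suf)) := by simp
      rw [hrw2, ih _ hsettled]
      refine fixB_congr_prefix _ _ pre 0 0 ?_
      intro a b
      rw [← fixB_move (lead suf) (suf.drop (lead suf)) a b]
      conv_rhs => rw [show suf = List.replicate (lead suf) '.' ++ suf.drop (lead suf) from lead_decomp suf]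
    · rw [if_neg hc]
      exact ih (c :: suf) (settled_cons c suf hs (Or.inl hc))

-- ¬D_ on one row: the part beyond the width has no 'O' followed by '.'
lemma settled_of_noPair (l : List Char)
    (h : ∀ j : Nat, ¬(l[j]? = some 'O' ∧ l[j + 1]? = some '.')) :
    settled l = true := by
  induction l with
  | nil => rfl
  | cons c t ih =>
    refine settled_cons c t (ih fun j hj => h (j + 1) (by simpa using hj)) ?_
    by_cases hc : c = 'O'
    · subst hc
      right
      cases t with
      | nil => simp
      | cons d u =>
        simp only [List.headD_cons]
        intro hd
        subst hd
        exact h 0 (by simp)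
    · exact Or.inl hc

-- per-row: A's full descending loop equals B's one-pass normalisation
lemma procA_eq_fixB (w : Nat) (row : List Char) (hw : w ≤ row.length)
    (hs : settled (row.drop w) = true) :
    procA row w = fixB row 0 0 := by
  have hlen : (row.take w).length = w := by simp [hw]
  have h := procA_fixB (row.take w) (row.drop w) hs
  rw [hlen] at h
  simpa using h


-- ===== tightness: A ≠ B everywhere inside D_ =====

-- positions before `lead l` are dots
lemma lead_le (l : List Char) : ∀ j : Nat, l[j]? = some 'O' → lead l ≤ j := by
  induction l with
  | nil => intro j h; simp at h
  | cons c rest ih =>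
    intro j h
    by_cases hc : c = '.'
    · subst hc
      cases j with
      | zero => simp at h
      | succ j =>
        simp only [List.getElem?_cons_succ] at h
        have := ih j h
        show (if ('.':Char) = '.' then lead rest + 1 else 0) ≤ j + 1
        rw [if_pos rfl]
        omega
    · simp [lead, hc]

-- a settled list has no 'O' immediately followed by '.'
lemma settled_no_pair (l : List Char) : ∀ i : Nat, settled l = true →
    ¬(l[i]? = some 'O' ∧ l[i + 1]? = some '.') := by
  induction l with
  | nil => intro i _ h; simp at h
  | cons c t ih =>
    intro i hs h
    cases i with
    | zero =>
      obtain ⟨h0, h1⟩ := h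
      simp only [List.getElem?_cons_zero, Option.some_inj] at h0
      subst h0
      cases t with
      | nil => simp at h1
      | cons d u =>
        simp only [List.getElem?_cons_succ, List.getElem?_cons_zero, Option.some_inj] at h1
        subst h1
        have : (!('O' = 'O' && '.' = '.') && settled ('.' :: u)) = true := hs
        simp at this
    | succ i =>
      exact ih i (settled_tail c t hs) (by simpa using h)

-- a dot prefix never breaks settledness
lemma settled_dots (a : Nat) (t : List Char) (ht : settled t = true) :
    settled (List.replicate a '.' ++ t) = true := by
  induction a with
  | zero => simpa
  | succ a ih =>
    rw [List.replicate_succ, List.cons_append]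
    exact settled_cons '.' _ ih (Or.inl (by simp))

-- rocks followed by a settled tail not starting with '.' are settled
lemma settled_rocks (b : Nat) (t : List Char)
    (ht : settled t = true) (hb : t.headD '#' ≠ '.') :
    settled (List.replicate b 'O' ++ t) = true := by
  induction b with
  | zero => simpa
  | succ b ih =>
    rw [List.replicate_succ, List.cons_append]
    refine settled_cons 'O' _ ih (Or.inr ?_)
    cases b with
    | zero => simpa using hb
    | succ b => simp [List.replicate_succ]

-- dots, then rocks, then a settled tail not starting with '.', is settled
lemma settled_dots_rocks (a b : Nat) (t : List Char)
    (ht : settled t = true) (hb : 0 < b → t.headD '#' ≠ '.') :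
    settled (List.replicate a '.' ++ List.replicate b 'O' ++ t) = true := by
  cases b with
  | zero => simpa using settled_dots a t ht
  | succ b =>
    rw [List.append_assoc]
    exact settled_dots a _ (settled_rocks (b + 1) t ht (hb (by omega)))

-- B's per-row result is always settled
lemma settled_fixB (l : List Char) : ∀ a b : Nat, settled (fixB l a b) = true := by
  induction l with
  | nil =>
    intro a b
    show settled (List.replicate a '.' ++ List.replicate b 'O') = true
    have := settled_dots_rocks a b [] rfl (by simp)
    simpa using this
  | cons c rest ih =>
    intro a b
    by_cases h1 : c = '.'
    · subst h1; rw [fixB_cons_dot]; exact ih _ _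
    · by_cases h2 : c = 'O'
      · subst h2; rw [fixB_cons_O]; exact ih _ _
      · rw [fixB_cons_blocked c rest a b h1 h2]
        exact settled_dots_rocks a b _
          (settled_cons c _ (ih 0 0) (Or.inl h2)) (fun _ => by simpa using h1)

-- indexing past the prefix of `pre ++ c :: suf`
lemma getElem_pre_cons (pre suf : List Char) (c : Char) (j : Nat) :
    (pre ++ c :: suf)[pre.length + 1 + j]? = suf[j]? := by
  rw [List.getElem?_append_right (by omega)]
  have : pre.length + 1 + j - pre.length = j + 1 := by omega
  rw [this, List.getElem?_cons_succ]

-- indexing the moved row past its prefix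
lemma getElem_moved (pre suf : List Char) (d k : Nat) (hd : d ≤ k) :
    (pre ++ List.replicate d '.' ++ 'O' :: suf.drop d)[pre.length + 1 + k]? = suf[k]? := by
  rw [List.append_assoc, List.getElem?_append_right (by omega)]
  have h1 : pre.length + 1 + k - pre.length = k + 1 := by omega
  rw [h1, List.getElem?_append_right (by simp; omega)]
  have h2 : k + 1 - (List.replicate d '.').length = (k - d) + 1 := by simp; omega
  rw [h2, List.getElem?_cons_succ, List.getElem?_drop]
  congr 1
  omega

-- one step of A's loop at a column y left of an 'O.' pair keeps the pair
lemma stepA_pair (row : List Char) (y i : Nat) (hyi : y < i)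
    (hO : row[i]? = some 'O') (hD : row[i + 1]? = some '.') :
    (stepA row y)[i]? = some 'O' ∧ (stepA row y)[i + 1]? = some '.' := by
  rcases hr : row[y]? with _ | c
  · unfold stepA; rw [hr]; exact ⟨hO, hD⟩
  · by_cases hc : c = 'O'
    · subst hc
      have hyl : y < row.length := by
        by_contra h
        rw [List.getElem?_eq_none (by omega)] at hr
        simp at hr
      have hdec : row = row.take y ++ 'O' :: row.drop (y + 1) := by
        conv_lhs => rw [← List.take_append_drop y row]
        rw [List.drop_eq_getElem_cons hyl]
        have : row[y] = 'O' := by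
          have := List.getElem?_eq_getElem hyl
          rw [hr] at this
          exact (Option.some_inj.mp this.symm)
        rw [this]
      set pre := row.take y with hpre
      set suf := row.drop (y + 1) with hsuf
      have hplen : pre.length = y := by simp [hpre]; omega
      set j := i - y - 1 with hj
      have hiy : i = pre.length + 1 + j := by omega
      have hO' : suf[j]? = some 'O' := by
        rw [hdec, hiy, getElem_pre_cons] at hO; exact hO
      have hD' : suf[j + 1]? = some '.' := by
        rw [hdec, show i + 1 = pre.length + 1 + (j + 1) by omega, getElem_pre_cons] at hD
        exact hD
      have hdj : lead suf ≤ j := lead_le suf j hO'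
      have hstep : stepA row y
          = pre ++ List.replicate (lead suf) '.' ++ 'O' :: suf.drop (lead suf) := by
        conv_lhs => rw [hdec, ← hplen]
        rw [stepA_spec pre suf 'O', if_pos rfl]
      rw [hstep, hiy]
      constructor
      · rw [getElem_moved pre suf _ j hdj]; exact hO'
      · rw [show pre.length + 1 + j + 1 = pre.length + 1 + (j + 1) by omega,
          getElem_moved pre suf _ (j + 1) (by omega)]
        exact hD'
    · unfold stepA; rw [hr]; simp only [if_neg hc]; exact ⟨hO, hD⟩

-- the whole descending loop over columns < k ≤ i keeps the pair
lemma procA_pair (i : Nat) : ∀ (k : Nat) (row : List Char), k ≤ i →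
    row[i]? = some 'O' → row[i + 1]? = some '.' →
    (procA row k)[i]? = some 'O' ∧ (procA row k)[i + 1]? = some '.' := by
  intro k
  induction k with
  | zero => intro row _ hO hD; exact ⟨hO, hD⟩
  | succ k ih =>
    intro row hk hO hD
    have h := stepA_pair row k i (by omega) hO hD
    exact ih (stepA row k) (by omega) h.1 h.2

-- ===== VERDICT (by name: the statements are the Claim_ definitions above) =====
theorem roll_east_spec : Claim_unchanged_roll_east := by
  intro lines _ hpre hnd
  unfold roll_east roll_east_alt
  apply List.map_congr_left
  intro s hs
  rw [rowB_eq, List.nil_append]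
  have hw := hpre s hs
  refine congrArg _ (procA_eq_fixB _ _ hw (settled_of_noPair _ ?_))
  intro j ⟨hO, hD⟩
  set w := (lines.headD "").toList.length with hwdef
  have hO' : s.toList[w + j]? = some 'O' := by
    rw [← List.getElem?_drop]; exact hO
  have hD' : s.toList[w + j + 1]? = some '.' := by
    rw [show w + j + 1 = w + (j + 1) by omega, ← List.getElem?_drop]; exact hD
  have hlt : w + j < s.toList.length := by
    by_contra h
    rw [List.getElem?_eq_none (by omega)] at hO'
    simp at hO'
  exact hnd ⟨s, hs, w + j, List.mem_range.mpr hlt, by omega, hO', hD'⟩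

theorem roll_east_changed : Claim_changed_roll_east := by
  unfold Claim_changed_roll_east; decide

theorem roll_east_tight : Claim_exact_roll_east := by
  intro lines _ _ hd heq
  obtain ⟨s, hs, i, _, hwi, hO, hD⟩ := hd
  obtain ⟨n, hn, hsn⟩ := List.getElem_of_mem hs
  have h1 : (roll_east lines)[n]? = (roll_east_alt lines)[n]? := by rw [heq]
  unfold roll_east roll_east_alt at h1
  rw [List.getElem?_map, List.getElem?_map, List.getElem?_eq_getElem hn, hsn] at h1
  simp only [Option.map_some, Option.some_inj] at h1
  have h2 : procA s.toList (lines.headD "").toList.length = rowB s.toList [] 0 0 := by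
    have := congrArg String.toList h1
    simpa using this
  rw [rowB_eq, List.nil_append] at h2
  have hpair := procA_pair i (lines.headD "").toList.length s.toList hwi hO hD
  rw [h2] at hpair
  exact settled_no_pair (fixB s.toList 0 0) i (settled_fixB s.toList 0 0) hpair
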